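-- pv_equiv track=rewrite | github.com/MaTaha-ualr/hybrid-entity-resolution-historical-records | z_Taha_Code/hm_taha_modules/cell10.py | recid_key
-- ===== SOURCE A (Python) =====
-- def recid_key(s: str):
--     """
--     Turn a RecID like '88.10' or '003.2' into a sortable (major, minor) tuple of ints.
--     Non-digits are ignored; missing minor → 0.
--     """
--     s = str(s).strip()
--     if "." in s:
--         a, b = s.split(".", 1)
--     else:
--         a, b = s, "0"
--     def to_int(x: str) -> int:
--         digits = "".join(ch for ch in str(x) if ch.isdigit())
--         return int(digits) if digits else 0
--     return (to_int(a), to_int(b))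
-- ===== SOURCE B (Python) =====
-- def recid_key(s: str):
--     """Single left-to-right pass: split at the first '.' and collect digits on
--     the fly, instead of strip/split/filter/join."""
--     seen = False
--     major = []
--     minor = []
--     for ch in str(s).strip():
--         if ch == '.' and not seen:
--             seen = True
--         elif ch.isdigit():
--             (minor if seen else major).append(ch)
--     a = ''.join(major)
--     b = ''.join(minor)
--     return (int(a) if a else 0, int(b) if b else 0)
-- ===== Notes on version B (the rewrite author's own statement) =====
-- stated objective: alternative
-- what changed: Replaces strip/split('.',1)/per-part filter-join with one left-to-right scan over the stripped string that routes digits into a major or minor accumulator using a seen-dot flag.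
import Mathlib
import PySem

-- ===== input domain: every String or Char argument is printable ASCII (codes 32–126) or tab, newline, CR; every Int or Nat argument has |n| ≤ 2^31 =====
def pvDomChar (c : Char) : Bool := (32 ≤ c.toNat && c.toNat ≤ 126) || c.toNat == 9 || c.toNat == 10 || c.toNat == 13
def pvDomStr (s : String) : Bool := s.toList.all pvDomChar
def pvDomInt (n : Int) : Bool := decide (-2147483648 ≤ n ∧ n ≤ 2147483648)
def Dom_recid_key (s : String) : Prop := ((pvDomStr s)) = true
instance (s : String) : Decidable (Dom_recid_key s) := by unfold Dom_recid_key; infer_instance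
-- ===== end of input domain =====

-- B is a single-pass scan with a seen-dot flag instead of A's strip/split/filter/join pipeline (alternative decomposition, same cost).

-- ===== PORT A =====
-- 'to_int': "".join(ch for ch in x if ch.isdigit()) is the digit filter; int(digits) if digits else 0.
-- (the .getD 0 branch is unreachable: int() of a nonempty all-digit string never raises)
def pvToIntA (x : List Char) : Int :=
  let digits := x.filter PySem.Chars.isdigit
  if digits.isEmpty then 0 else (PySem.Int.ofChars? digits).getD 0

def recid_key (s : String) : Int × Int :=
  let cs := PySem.Chars.strip s.toList
  let ab :=
    if PySem.Chars.isIn ['.'] cs then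
      match PySem.Chars.splitOnMax cs ['.'] 1 with
      | x :: y :: _ => (x, y)
      | _ => ([], [])   -- unreachable: split with '.' present and maxsplit 1 yields exactly 2 parts
    else (cs, ['0'])
  (pvToIntA ab.1, pvToIntA ab.2)

-- ===== PORT B =====
def pvStepB (st : Bool × List Char × List Char) (ch : Char) : Bool × List Char × List Char :=
  if ch = '.' ∧ st.1 = false then (true, st.2.1, st.2.2)
  else if PySem.Chars.isdigit ch then
    (if st.1 then (st.1, st.2.1, st.2.2 ++ [ch]) else (st.1, st.2.1 ++ [ch], st.2.2))
  else st

def pvToIntB (digits : List Char) : Int :=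
  if digits.isEmpty then 0 else (PySem.Int.ofChars? digits).getD 0

def recid_key_alt (s : String) : Int × Int :=
  let st := (PySem.Chars.strip s.toList).foldl pvStepB (false, [], [])
  (pvToIntB st.2.1, pvToIntB st.2.2)

-- ===== PRECONDITION & SPEC =====
def Spec_recid_key (s : String) (out : Int × Int) : Prop := out = recid_key_alt s
instance (s : String) (out : Int × Int) : Decidable (Spec_recid_key s out) := by unfold Spec_recid_key; infer_instance

-- ===== CLAIM (what is proved, stated in full; the proofs are below) =====
def Claim_equal_recid_key : Prop := ∀ (s : String), Dom_recid_key s → Spec_recid_key s (recid_key s)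

-- ===== LEMMAS AND PROOFS =====

-- B's loop with the flag already set only appends the digits of the rest to the minor accumulator.
lemma foldB_seen (q : List Char) : ∀ (ma mi : List Char),
    q.foldl pvStepB (true, ma, mi) = (true, ma, mi ++ q.filter PySem.Chars.isdigit) := by
  induction q with
  | nil => simp
  | cons c q ih =>
    intro ma mi
    by_cases hd : PySem.Chars.isdigit c <;>
      simp [pvStepB, hd, ih]

-- B's loop before any dot routes digits to the major accumulator.
lemma foldB_unseen (p : List Char) (hp : '.' ∉ p) : ∀ (ma mi : List Char),
    p.foldl pvStepB (false, ma, mi) = (false, ma ++ p.filter PySem.Chars.isdigit, mi) := by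
  induction p with
  | nil => simp
  | cons c p ih =>
    intro ma mi
    have hc : c ≠ '.' := fun h => hp (h ▸ List.mem_cons_self)
    have hp' : '.' ∉ p := fun h => hp (List.mem_cons_of_mem _ h)
    by_cases hd : PySem.Chars.isdigit c <;>
      simp [pvStepB, hc, hd, ih hp']

-- the first '.' of a list containing one splits it as p ++ '.' :: q with '.' ∉ p
lemma first_dot_split (l : List Char) (h : '.' ∈ l) :
    ∃ p q, l = p ++ '.' :: q ∧ '.' ∉ p := by
  induction l with
  | nil => cases h
  | cons c l ih =>
    by_cases hc : c = '.'
    · exact ⟨[], l, by simp [hc], by simp⟩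
    · have hmem : '.' ∈ l := by
        rcases List.mem_cons.mp h with h0 | h0
        · exact absurd h0.symm hc
        · exact h0
      obtain ⟨p, q, rfl, hp⟩ := ih hmem
      have hc2 : ¬ '.' = c := fun h0 => hc h0.symm
      exact ⟨c :: p, q, rfl, by simp [hp, hc2]⟩

-- splitOnMax.go with budget 0 splits left just flushes the rest
lemma go_done (fuel : Nat) (q cur : List Char) (acc : List (List Char)) :
    PySem.Chars.splitOnMax.go ['.'] (fuel + 1) 0 q cur acc
      = ((cur.reverse ++ q) :: acc).reverse := by
  cases q <;> simp [PySem.Chars.splitOnMax.go]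

-- splitOnMax.go with one split left, on p ++ '.' :: q with '.' ∉ p
lemma go_one (p : List Char) (hp : '.' ∉ p) : ∀ (fuel : Nat) (q cur : List Char)
    (acc : List (List Char)),
    PySem.Chars.splitOnMax.go ['.'] (fuel + p.length + 2) 1 (p ++ '.' :: q) cur acc
      = acc.reverse ++ [cur.reverse ++ p, q] := by
  induction p with
  | nil =>
    intro fuel q cur acc
    simp [PySem.Chars.splitOnMax.go, go_done fuel]
  | cons c p ih =>
    intro fuel q cur acc
    have hc : c ≠ '.' := fun h => hp (h ▸ List.mem_cons_self)
    have hc' : ¬ '.' = c := fun h => hc h.symm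
    have hp' : '.' ∉ p := fun h => hp (List.mem_cons_of_mem _ h)
    have hpre : List.isPrefixOf ['.'] (c :: (p ++ '.' :: q)) = false := by
      simp [List.isPrefixOf, hc']
    have : fuel + (c :: p).length + 2 = (fuel + p.length + 2) + 1 := by simp; omega
    rw [this]
    simp only [PySem.Chars.splitOnMax.go, hpre, List.cons_append]
    have := ih hp' fuel q (c :: cur) acc
    simp only [if_neg (by omega : ¬ (1 : Nat) = 0)]
    rw [this]
    simp

-- s.split('.', 1) on p ++ '.' :: q with '.' ∉ p is [p, q]
lemma splitOnMax_first_dot (p q : List Char) (hp : '.' ∉ p) :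
    PySem.Chars.splitOnMax (p ++ '.' :: q) ['.'] 1 = [p, q] := by
  have hlen : (p ++ '.' :: q).length + 1 = q.length + p.length + 2 := by simp; omega
  simp only [PySem.Chars.splitOnMax, if_neg (by omega : ¬ (1 : Int) < 0), Int.toNat_one, hlen]
  rw [go_one p hp q.length q [] []]
  simp

lemma isIn_dot (l : List Char) : PySem.Chars.isIn ['.'] l = true ↔ '.' ∈ l := by
  rw [PySem.Chars.isIn_iff_infix]
  exact List.singleton_infix_iff '.' l

-- ===== VERDICT (by name: the statement is the Claim_ definition above) =====
theorem recid_key_spec : Claim_equal_recid_key := by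
  intro s _
  unfold Spec_recid_key recid_key recid_key_alt
  set cs := PySem.Chars.strip s.toList with hcs
  by_cases h : '.' ∈ cs
  · obtain ⟨p, q, hpq, hp⟩ := first_dot_split cs h
    rw [hpq]
    have hin : PySem.Chars.isIn ['.'] (p ++ '.' :: q) = true :=
      (isIn_dot _).mpr (hpq ▸ h)
    simp only [hin, if_pos, splitOnMax_first_dot p q hp]
    rw [List.foldl_append, foldB_unseen p hp]
    have hstep : pvStepB (false, p.filter PySem.Chars.isdigit, ([] : List Char)) '.'
        = (true, p.filter PySem.Chars.isdigit, []) := by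
      simp [pvStepB]
    simp only [List.foldl_cons, List.nil_append, hstep, foldB_seen]
    simp [pvToIntA, pvToIntB]
  · have hin : ¬ PySem.Chars.isIn ['.'] cs = true :=
      fun h' => h ((isIn_dot cs).mp h')
    simp only [if_neg hin]
    have hfold := foldB_unseen cs h [] []
    rw [hfold]
    simp [pvToIntA, pvToIntB]
    decide
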